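-- pv_equiv track=rewrite | github.com/nadahenchir/dg_toolkit | app/seed/seed.py | match_kpi
-- ===== SOURCE A (Python) =====
-- def match_kpi(kpi_name_from_excel, kpi_map):
--     """
--     Match a KPI name from Excel to a KPI ID in the DB.
--     Three-stage matching:
--       1. Exact match (normalized)
--       2. Substring match (one contains the other)
--       3. Word overlap fallback (at least 3 words in common)
--     Returns (kpi_id, matched_name) or (None, None).
--     """
--     n2 = kpi_name_from_excel.lower().strip()
--
--     # Stage 1 — exact
--     for name, kid in kpi_map.items():
--         if name.lower().strip() == n2:
--             return kid, name
--
--     # Stage 2 — substring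
--     for name, kid in kpi_map.items():
--         n1 = name.lower().strip()
--         if n1 in n2 or n2 in n1:
--             return kid, name
--
--     # Stage 3 — word overlap (at least 3 words in common)
--     kpi_words = set(n2.split())
--     best_kid, best_name, best_overlap = None, None, 0
--     for name, kid in kpi_map.items():
--         name_words = set(name.lower().strip().split())
--         overlap = len(kpi_words & name_words)
--         if overlap >= 3 and overlap > best_overlap:
--             best_kid, best_name, best_overlap = kid, name, overlap
--
--     return best_kid, best_name
-- ===== SOURCE B (Python) =====
-- def match_kpi(kpi_name_from_excel, kpi_map):
--     """Single fused pass: exact match returns immediately; the first substring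
--     candidate and the best (>=3, strictly improving) word-overlap candidate are
--     tracked on the way and resolved after the loop."""
--     n2 = kpi_name_from_excel.lower().strip()
--     kpi_words = set(n2.split())
--     sub = None
--     best_kid, best_name, best_overlap = None, None, 0
--     for name, kid in kpi_map.items():
--         n1 = name.lower().strip()
--         if n1 == n2:
--             return kid, name
--         if sub is None and (n1 in n2 or n2 in n1):
--             sub = (kid, name)
--         overlap = len(kpi_words & set(n1.split()))
--         if overlap >= 3 and overlap > best_overlap:
--             best_kid, best_name, best_overlap = kid, name, overlap
--     if sub is not None:
--         return sub
--     return best_kid, best_name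
-- ===== Notes on version B (the rewrite author's own statement) =====
-- stated objective: alternative
-- what changed: The three sequential scans over kpi_map (exact, substring, word-overlap) are fused into one pass that early-returns on exact, records the first substring candidate, and tracks the best word-overlap candidate, resolving priorities after the loop.
import Mathlib
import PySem

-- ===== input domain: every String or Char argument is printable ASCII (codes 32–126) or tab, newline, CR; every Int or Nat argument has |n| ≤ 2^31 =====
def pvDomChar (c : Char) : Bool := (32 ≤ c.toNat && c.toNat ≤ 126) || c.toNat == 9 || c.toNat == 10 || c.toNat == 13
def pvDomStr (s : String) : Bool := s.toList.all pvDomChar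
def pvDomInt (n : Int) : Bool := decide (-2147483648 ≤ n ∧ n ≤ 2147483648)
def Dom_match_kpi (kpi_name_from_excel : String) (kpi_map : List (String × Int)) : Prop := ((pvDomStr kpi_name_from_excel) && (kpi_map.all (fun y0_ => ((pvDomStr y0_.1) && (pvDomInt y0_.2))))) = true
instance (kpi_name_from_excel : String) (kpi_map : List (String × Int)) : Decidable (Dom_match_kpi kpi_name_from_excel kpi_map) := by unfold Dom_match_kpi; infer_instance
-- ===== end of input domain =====

-- B fuses A's three scans over kpi_map into one pass (exact early-return, first
-- substring candidate recorded, best word-overlap tracked); alternative decomposition, same cost.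

-- name.lower().strip()  (shared transliteration of the normalisation both sources write)
def pyNorm (s : String) : String := PySem.Str.strip (PySem.Str.lower s)

-- len(kpi_words & set(n1.split()))
def pyOverlap (w : List String) (n1 : String) : Int :=
  PySem.Set.len (PySem.Set.inter w (PySem.Set.ofList (PySem.Str.split₀ n1)))

-- ===== PORT A =====
-- Stage 1 — exact
def stage1A (n2 : String) : List (String × Int) → Option (Int × String)
  | [] => none
  | (name, kid) :: rest =>
      if pyNorm name = n2 then some (kid, name) else stage1A n2 rest

-- Stage 2 — substring
def stage2A (n2 : String) : List (String × Int) → Option (Int × String)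
  | [] => none
  | (name, kid) :: rest =>
      let n1 := pyNorm name
      if PySem.Str.isIn n1 n2 || PySem.Str.isIn n2 n1 then some (kid, name)
      else stage2A n2 rest

-- Stage 3 — word-overlap fold (state: best_kid, best_name, best_overlap)
def stage3Step (w : List String) (st : Option Int × Option String × Int) (p : String × Int) :
    Option Int × Option String × Int :=
  let ov := pyOverlap w (pyNorm p.1)
  if 3 ≤ ov ∧ st.2.2 < ov then (some p.2, some p.1, ov) else st

def match_kpi (kpi_name_from_excel : String) (kpi_map : List (String × Int)) : Option Int × Option String :=
  let n2 := pyNorm kpi_name_from_excel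
  match stage1A n2 kpi_map with
  | some (kid, name) => (some kid, some name)
  | none =>
    match stage2A n2 kpi_map with
    | some (kid, name) => (some kid, some name)
    | none =>
      let w := PySem.Set.ofList (PySem.Str.split₀ n2)
      let st := kpi_map.foldl (stage3Step w) (none, none, 0)
      (st.1, st.2.1)

-- ===== PORT B =====
-- single fused pass: sub = first substring candidate, best = word-overlap state
def loopB (n2 : String) (w : List String) :
    List (String × Int) → Option (Int × String) → Option Int × Option String × Int →
    Option Int × Option String
  | [], sub, best =>
      match sub with
      | some (kid, name) => (some kid, some name)
      | none => (best.1, best.2.1)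
  | (name, kid) :: rest, sub, best =>
      let n1 := pyNorm name
      if n1 = n2 then (some kid, some name)
      else
        let sub' := match sub with
          | some s => some s
          | none =>
              if PySem.Str.isIn n1 n2 || PySem.Str.isIn n2 n1 then some (kid, name) else none
        let ov := pyOverlap w n1
        let best' := if 3 ≤ ov ∧ best.2.2 < ov then (some kid, some name, ov) else best
        loopB n2 w rest sub' best'

def match_kpi_alt (kpi_name_from_excel : String) (kpi_map : List (String × Int)) : Option Int × Option String :=
  let n2 := pyNorm kpi_name_from_excel
  loopB n2 (PySem.Set.ofList (PySem.Str.split₀ n2)) kpi_map none (none, none, 0)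

-- ===== PRECONDITION & SPEC =====
def Spec_match_kpi (kpi_name_from_excel : String) (kpi_map : List (String × Int)) (out : Option Int × Option String) : Prop := out = match_kpi_alt kpi_name_from_excel kpi_map
instance (kpi_name_from_excel : String) (kpi_map : List (String × Int)) (out : Option Int × Option String) : Decidable (Spec_match_kpi kpi_name_from_excel kpi_map out) := by unfold Spec_match_kpi; infer_instance

-- ===== CLAIM (what is proved, stated in full; the proofs are below) =====
def Claim_equal_match_kpi : Prop := ∀ (kpi_name_from_excel : String) (kpi_map : List (String × Int)), Dom_match_kpi kpi_name_from_excel kpi_map → Spec_match_kpi kpi_name_from_excel kpi_map (match_kpi kpi_name_from_excel kpi_map)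

-- ===== LEMMAS AND PROOFS =====

-- what A computes from the three stages, parameterised by B's loop state
def stagedR (n2 : String) (w : List String) (l : List (String × Int))
    (sub : Option (Int × String)) (best : Option Int × Option String × Int) :
    Option Int × Option String :=
  match stage1A n2 l with
  | some (kid, name) => (some kid, some name)
  | none =>
    match sub with
    | some (kid, name) => (some kid, some name)
    | none =>
      match stage2A n2 l with
      | some (kid, name) => (some kid, some name)
      | none =>
        let st := l.foldl (stage3Step w) best
        (st.1, st.2.1)

theorem loopB_eq_stagedR (n2 : String) (w : List String) :
    ∀ (l : List (String × Int)) (sub : Option (Int × String))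
      (best : Option Int × Option String × Int),
      loopB n2 w l sub best = stagedR n2 w l sub best := by
  intro l
  induction l with
  | nil =>
      intro sub best
      cases sub with
      | none => simp [loopB, stagedR, stage1A, stage2A]
      | some s => cases s; simp [loopB, stagedR, stage1A]
  | cons hd rest ih =>
      intro sub best
      obtain ⟨name, kid⟩ := hd
      by_cases hx : pyNorm name = n2
      · simp [loopB, stagedR, stage1A, hx]
      · rw [loopB.eq_def, stagedR.eq_def]
        simp only [hx, if_false]
        rw [ih]
        cases sub with
        | some s =>
            obtain ⟨k, n⟩ := s
            simp [stagedR, stage1A, hx]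
        | none =>
            cases h1 : stage1A n2 rest with
            | some v =>
                obtain ⟨k, n⟩ := v
                simp [stagedR, stage1A, hx, h1]
            | none =>
                simp only [stagedR, stage1A, hx, if_false, h1, stage2A]
                split_ifs <;> (try rfl) <;>
                  (rename_i ho
                   simp only [List.foldl_cons, stage3Step]
                   first
                   | rw [if_neg ho]
                   | rw [if_pos ho])

-- ===== VERDICT (by name: the statement is the Claim_ definition above) =====
theorem match_kpi_spec : Claim_equal_match_kpi := by
  intro name map _
  unfold Spec_match_kpi match_kpi match_kpi_alt
  rw [loopB_eq_stagedR]
  rfl
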